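-- pv_equiv track=rewrite | github.com/MikeRedfox/code-advent | 2024/day22/day22.py | process
-- ===== SOURCE A (Python) =====
-- def process(secret: int, iterations=1) -> int:
--     for _ in range(iterations):
--         n = 64 * secret
--         secret = secret ^ n
--         secret = secret % 16777216
--         t = secret // 32
--         secret = secret ^ t
--         secret = secret % 16777216
--         t2 = secret * 2048
--         secret = secret ^ t2
--         secret = secret % 16777216
--
--     return secret
-- ===== SOURCE B (Python) =====
-- def process(secret: int, iterations=1) -> int:
--     # One PRNG step is a GF(2)-linear map on the 24-bit state, so n steps are
--     # computed as a 24x24 bit-matrix power (exponentiation by squaring).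
--     if iterations <= 0:
--         return secret
--     MASK = (1 << 24) - 1
--
--     def step(x):
--         x = (x ^ (x << 6)) & MASK
--         x = (x ^ (x >> 5)) & MASK
--         return (x ^ (x << 11)) & MASK
--
--     def apply(cols, x):
--         # multiply the matrix given by its 24 columns with the bit vector x
--         if not cols:
--             return 0
--         r = apply(cols[1:], x >> 1)
--         return (r ^ cols[0]) if x & 1 else r
--
--     def mul(m1, m2):
--         return [apply(m1, c) for c in m2]
--
--     def matpow(m, n):
--         if n == 0:
--             return [1 << j for j in range(24)]  # identity
--         half = matpow(m, n // 2)
--         sq = mul(half, half)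
--         return mul(m, sq) if n % 2 else sq
--
--     base = [step(1 << j) for j in range(24)]
--     return apply(matpow(base, iterations), secret & MASK)
-- ===== Notes on version B (the rewrite author's own statement) =====
-- stated objective: faster
-- what changed: The PRNG step is GF(2)-linear on the 24-bit state, so B replaces the per-iteration loop by exponentiation by squaring of the 24x24 bit matrix of the step, then applies the matrix power once to secret mod 2^24.
import Mathlib
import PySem

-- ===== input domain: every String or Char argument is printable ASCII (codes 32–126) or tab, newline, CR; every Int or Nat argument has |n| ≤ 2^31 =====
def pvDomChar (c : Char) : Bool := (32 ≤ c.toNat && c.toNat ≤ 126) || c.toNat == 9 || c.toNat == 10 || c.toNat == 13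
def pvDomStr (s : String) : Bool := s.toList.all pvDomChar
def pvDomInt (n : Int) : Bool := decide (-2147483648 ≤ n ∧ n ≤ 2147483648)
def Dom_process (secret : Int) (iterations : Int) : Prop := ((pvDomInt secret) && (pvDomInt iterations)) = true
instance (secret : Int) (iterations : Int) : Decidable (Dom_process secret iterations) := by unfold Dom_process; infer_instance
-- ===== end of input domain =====

-- B replaces A's per-iteration PRNG loop by GF(2) bit-matrix exponentiation by squaring (objective: faster, measured).


-- ===== PORT A =====
-- A's loop body, named so the fold below can iterate it (literal transliteration of the body).
def processStep (secret : Int) : Int :=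
  let n := 64 * secret
  let s1 := PySem.Int.bxor secret n
  let s2 := PySem.Int.mod s1 16777216
  let t := PySem.Int.floordiv s2 32
  let s3 := PySem.Int.bxor s2 t
  let s4 := PySem.Int.mod s3 16777216
  let t2 := s4 * 2048
  let s5 := PySem.Int.bxor s4 t2
  PySem.Int.mod s5 16777216

def process (secret : Int) (iterations : Int) : Int :=
  (PySem.List.pyRange 0 iterations 1).foldl (fun s _ => processStep s) secret

-- ===== PORT B =====
-- Source B's step(x): one PRNG step on the 24-bit state, written with shifts and masks.
def pvStep (x : Nat) : Nat :=
  let x1 := (x ^^^ (x <<< 6)) &&& 16777215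
  let x2 := (x1 ^^^ (x1 >>> 5)) &&& 16777215
  (x2 ^^^ (x2 <<< 11)) &&& 16777215

-- Source B's apply(cols, x): matrix (given by columns) times bit vector, recursing on the columns.
def pvApply (cols : List Nat) (x : Nat) : Nat :=
  match cols with
  | [] => 0
  | c :: cs =>
    let r := pvApply cs (x >>> 1)
    if x &&& 1 == 1 then r ^^^ c else r

-- Source B's mul(m1, m2)
def pvMul (m1 m2 : List Nat) : List Nat := m2.map (fun c => pvApply m1 c)

-- Source B's matpow(m, n): exponentiation by squaring
def pvMatpow (m : List Nat) (n : Nat) : List Nat :=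
  if h : n = 0 then (List.range 24).map (fun j => 1 <<< j)
  else
    let half := pvMatpow m (n / 2)
    let sq := pvMul half half
    if n % 2 = 1 then pvMul m sq else sq
termination_by n
decreasing_by exact Nat.div_lt_self (Nat.pos_of_ne_zero h) (by omega)

def process_alt (secret : Int) (iterations : Int) : Int :=
  if iterations ≤ 0 then secret
  else
    let base := (List.range 24).map (fun j => pvStep (1 <<< j))
    ((pvApply (pvMatpow base iterations.toNat) ((PySem.Int.band secret 16777215).toNat) : Nat) : Int)

-- ===== PRECONDITION & SPEC =====
def Spec_process (secret : Int) (iterations : Int) (out : Int) : Prop := out = process_alt secret iterations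
instance (secret : Int) (iterations : Int) (out : Int) : Decidable (Spec_process secret iterations out) := by unfold Spec_process; infer_instance

-- ===== CLAIM (what is proved, stated in full; the proofs are below) =====
def Claim_equal_process : Prop := ∀ (secret : Int) (iterations : Int), Dom_process secret iterations → Spec_process secret iterations (process secret iterations)

-- ===== LEMMAS AND PROOFS =====

lemma tailEq (y : ℕ) :
    ((y ^^^ y / 32) % 16777216 ^^^ ((y ^^^ y / 32) % 16777216) * 2048) % 16777216 =
    (((y ^^^ (y >>> 5)) &&& 16777215) ^^^ (((y ^^^ (y >>> 5)) &&& 16777215) <<< 11)) &&& 16777215 := by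
  have hm : ∀ z : ℕ, z &&& 16777215 = z % 16777216 := by
    intro z; have h := Nat.and_two_pow_sub_one_eq_mod z 24; norm_num at h; exact h
  rw [hm, hm, Nat.shiftRight_eq_div_pow, Nat.shiftLeft_eq]

lemma pvStep_lt (x : ℕ) : pvStep x < 16777216 := by
  have h : pvStep x = ((((x ^^^ x <<< 6) &&& 16777215 ^^^ ((x ^^^ x <<< 6) &&& 16777215) >>> 5) &&& 16777215) ^^^ ((((x ^^^ x <<< 6) &&& 16777215 ^^^ ((x ^^^ x <<< 6) &&& 16777215) >>> 5) &&& 16777215) <<< 11)) &&& 16777215 := rfl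
  rw [h]
  exact lt_of_le_of_lt Nat.and_le_right (by norm_num)

lemma pvStep_iter_lt (n x : ℕ) (hx : x < 16777216) : pvStep^[n] x < 16777216 := by
  cases n with
  | zero => exact hx
  | succ n => rw [Function.iterate_succ_apply']; exact pvStep_lt _

lemma pvApply_zero (cols : List ℕ) : pvApply cols 0 = 0 := by
  induction cols with
  | nil => rfl
  | cons c cs ih => simp [pvApply, ih]

lemma band_mask_lt (s : ℤ) : (PySem.Int.band s 16777215).toNat < 16777216 := by
  unfold PySem.Int.band
  by_cases h : (0:ℤ) ≤ s
  · have h1 : s.toNat &&& (16777215:ℤ).toNat ≤ (16777215:ℤ).toNat := Nat.and_le_right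
    simp only [h, if_true]
    split <;> omega
  · simp only [h, if_false]
    split <;> omega

lemma foldl_const_iterate (l : List ℤ) (x : ℤ) :
    l.foldl (fun s _ => processStep s) x = processStep^[l.length] x := by
  induction l generalizing x with
  | nil => rfl
  | cons a l ih => simp [List.foldl, ih, Function.iterate_succ_apply]

lemma process_eq_iterate (secret it : ℤ) : process secret it = processStep^[it.toNat] secret := by
  unfold process
  rw [foldl_const_iterate]
  congr 1
  unfold PySem.List.pyRange
  by_cases h : 0 < it <;> simp [h] <;> omega

lemma stage1_nonneg (a : ℕ) :
    (a ^^^ 64 * a) % 16777216 = ((a &&& 16777215) ^^^ ((a &&& 16777215) <<< 6)) &&& 16777215 := by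
  have hm : ∀ z : ℕ, z &&& 16777215 = z % 16777216 := by
    intro z; have h := Nat.and_two_pow_sub_one_eq_mod z 24; norm_num at h; exact h
  rw [hm, hm]
  have h64 : 64 * a = a <<< 6 := by rw [Nat.shiftLeft_eq]; ring
  rw [h64]
  have h : (16777216 : ℕ) = 2 ^ 24 := by norm_num
  rw [h]
  apply Nat.eq_of_testBit_eq
  intro i
  simp only [Nat.testBit_mod_two_pow, Nat.testBit_xor, Nat.testBit_shiftLeft, ge_iff_le]
  by_cases h1 : i < 24 <;> by_cases h2 : 6 ≤ i <;>
    simp [h1, h2] <;> (try intro _) <;> omega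

lemma stage1_neg (u : ℕ) :
    (u ^^^ (64 * u + 63)) % 16777216 =
    ((16777215 - (16777215 &&& u)) ^^^ ((16777215 - (16777215 &&& u)) <<< 6)) &&& 16777215 := by
  have hm : ∀ z : ℕ, z &&& 16777215 = z % 16777216 := by
    intro z; have h := Nat.and_two_pow_sub_one_eq_mod z 24; norm_num at h; exact h
  rw [show (16777215 &&& u) = u % 16777216 from by rw [Nat.and_comm]; exact hm u, hm]
  have hmu : u % 16777216 < 16777216 := Nat.mod_lt _ (by norm_num)
  have hsub : 16777215 - u % 16777216 = 2 ^ 24 - (u % 16777216 + 1) := by omega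
  rw [hsub]
  have h : (16777216 : ℕ) = 2 ^ 24 := by norm_num
  rw [h]
  have h63 : 64 * u + 63 = 2 ^ 6 * u + 63 := by ring
  apply Nat.eq_of_testBit_eq
  intro i
  have hb : (2 ^ 24 - (u % 2 ^ 24 + 1)).testBit = fun i => (decide (i < 24) && !(u % 2 ^ 24).testBit i) := by
    funext i; exact Nat.testBit_two_pow_sub_succ (by exact Nat.mod_lt _ (by norm_num)) i
  simp only [Nat.testBit_mod_two_pow, Nat.testBit_xor, Nat.testBit_shiftLeft, ge_iff_le, h63,
    Nat.testBit_two_pow_mul_add (b := 63) (i := 6) u (by norm_num), hb]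
  by_cases h1 : i < 24 <;> by_cases h2 : 6 ≤ i
  · have h3 : i - 6 < 24 := by omega
    simp only [h1, h2, h3, show ¬ (i < 6) from by omega, decide_true, Bool.true_and,
      decide_false, Bool.false_and, if_false, ite_false, Bool.not_false, Bool.not_true]
    cases hx : u.testBit i <;> cases hy : u.testBit (i - 6) <;> simp
  · have h63b : Nat.testBit 63 i = true := by
      have h5 := Nat.testBit_two_pow_sub_one 6 i
      norm_num at h5
      simp [h5, show i < 6 from by omega]
    simp [h1, h2, h63b, show i < 6 from by omega]
  · simp [h1]
  · simp [h1]

lemma natCross (a : ℕ) :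
    (((a ^^^ 64 * a) % 16777216 ^^^ ((a ^^^ 64 * a) % 16777216) / 32) % 16777216 ^^^
      ((((a ^^^ 64 * a) % 16777216 ^^^ ((a ^^^ 64 * a) % 16777216) / 32) % 16777216)) * 2048) % 16777216
    = pvStep (a &&& 16777215) := by
  rw [tailEq, stage1_nonneg]
  rfl

lemma natCrossNeg (u : ℕ) :
    (((u ^^^ (64 * u + 63)) % 16777216 ^^^ ((u ^^^ (64 * u + 63)) % 16777216) / 32) % 16777216 ^^^
      ((((u ^^^ (64 * u + 63)) % 16777216 ^^^ ((u ^^^ (64 * u + 63)) % 16777216) / 32) % 16777216)) * 2048) % 16777216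
    = pvStep (16777215 - (16777215 &&& u)) := by
  rw [tailEq, stage1_neg]
  rfl

lemma stepCross (s : ℤ) :
    processStep s = ((pvStep ((PySem.Int.band s 16777215).toNat) : ℕ) : ℤ) := by
  have hmod : ∀ x : ℕ, PySem.Int.mod (x:ℤ) 16777216 = ((x % 16777216 : ℕ) : ℤ) := by
    intro x; rw [show (16777216:ℤ) = ((16777216:ℕ):ℤ) from by norm_num, PySem.Int.mod_natCast]
  have hfd : ∀ x : ℕ, PySem.Int.floordiv (x:ℤ) 32 = ((x / 32 : ℕ) : ℤ) := by
    intro x; rw [show (32:ℤ) = ((32:ℕ):ℤ) from by norm_num, PySem.Int.floordiv_natCast]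
  have hx : ∀ x y : ℕ, PySem.Int.bxor (x:ℤ) (y:ℤ) = ((x ^^^ y : ℕ) : ℤ) := PySem.Int.bxor_natCast
  have hmul : ∀ x : ℕ, ((x:ℤ)) * 2048 = ((x * 2048 : ℕ) : ℤ) := by intro x; push_cast; ring
  by_cases hs : (0:ℤ) ≤ s
  · lift s to ℕ using hs with a
    have hband : PySem.Int.band (a:ℤ) 16777215 = ((a &&& 16777215 : ℕ) : ℤ) := by
      rw [show (16777215:ℤ) = ((16777215:ℕ):ℤ) from by norm_num, PySem.Int.band_natCast]
    rw [hband, Int.toNat_natCast]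
    show PySem.Int.mod (PySem.Int.bxor (PySem.Int.mod (PySem.Int.bxor
        (PySem.Int.mod (PySem.Int.bxor (a:ℤ) (64 * (a:ℤ))) 16777216)
        (PySem.Int.floordiv (PySem.Int.mod (PySem.Int.bxor (a:ℤ) (64 * (a:ℤ))) 16777216) 32)) 16777216)
      ((PySem.Int.mod (PySem.Int.bxor (PySem.Int.mod (PySem.Int.bxor (a:ℤ) (64 * (a:ℤ))) 16777216)
        (PySem.Int.floordiv (PySem.Int.mod (PySem.Int.bxor (a:ℤ) (64 * (a:ℤ))) 16777216) 32)) 16777216) * 2048)) 16777216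
      = ((pvStep (a &&& 16777215) : ℕ) : ℤ)
    rw [show (64 * (a:ℤ)) = ((64 * a : ℕ) : ℤ) from by push_cast; ring,
      hx, hmod, hfd, hx, hmod, hmul, hx, hmod, natCross]
  · set u : ℕ := (-s - 1).toNat with hu
    have hsu : s = -(u:ℤ) - 1 := by omega
    have hband : PySem.Int.band s 16777215 = ((16777215 - (16777215 &&& u) : ℕ) : ℤ) := by
      unfold PySem.Int.band
      rw [if_neg (by omega), if_pos (by norm_num)]
      congr 1
    have hbxor : PySem.Int.bxor s (64 * s) = ((u ^^^ (64 * u + 63) : ℕ) : ℤ) := by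
      unfold PySem.Int.bxor
      rw [if_neg (by omega), if_neg (by omega)]
      have e1 : (-s - 1).toNat = u := by omega
      have e2 : (-(64 * s) - 1).toNat = 64 * u + 63 := by omega
      rw [e1, e2]
    rw [hband, Int.toNat_natCast]
    show PySem.Int.mod (PySem.Int.bxor (PySem.Int.mod (PySem.Int.bxor
        (PySem.Int.mod (PySem.Int.bxor s (64 * s)) 16777216)
        (PySem.Int.floordiv (PySem.Int.mod (PySem.Int.bxor s (64 * s)) 16777216) 32)) 16777216)
      ((PySem.Int.mod (PySem.Int.bxor (PySem.Int.mod (PySem.Int.bxor s (64 * s)) 16777216)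
        (PySem.Int.floordiv (PySem.Int.mod (PySem.Int.bxor s (64 * s)) 16777216) 32)) 16777216) * 2048)) 16777216
      = ((pvStep (16777215 - (16777215 &&& u)) : ℕ) : ℤ)
    rw [hbxor, hmod, hfd, hx, hmod, hmul, hx, hmod, natCrossNeg]

lemma pvStep_eq (x : ℕ) : pvStep x =
    (((x ^^^ x <<< 6) &&& 16777215 ^^^ ((x ^^^ x <<< 6) &&& 16777215) >>> 5) &&& 16777215 ^^^
     (((x ^^^ x <<< 6) &&& 16777215 ^^^ ((x ^^^ x <<< 6) &&& 16777215) >>> 5) &&& 16777215) <<< 11) &&& 16777215 := rfl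

lemma blendL (x y k : ℕ) : ((x ^^^ y) ^^^ ((x ^^^ y) <<< k)) &&& 16777215 =
    ((x ^^^ x <<< k) &&& 16777215) ^^^ ((y ^^^ y <<< k) &&& 16777215) := by
  apply Nat.eq_of_testBit_eq; intro i
  simp only [Nat.testBit_and, Nat.testBit_xor, Nat.testBit_shiftLeft, ge_iff_le]
  cases hx : x.testBit i <;> cases hy : y.testBit i <;> cases hx2 : x.testBit (i - k) <;>
    cases hy2 : y.testBit (i - k) <;> cases hm : (16777215:ℕ).testBit i <;>
    cases hd : decide (k ≤ i) <;> rfl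

lemma blendR (x y k : ℕ) : ((x ^^^ y) ^^^ ((x ^^^ y) >>> k)) &&& 16777215 =
    ((x ^^^ x >>> k) &&& 16777215) ^^^ ((y ^^^ y >>> k) &&& 16777215) := by
  apply Nat.eq_of_testBit_eq; intro i
  simp only [Nat.testBit_and, Nat.testBit_xor, Nat.testBit_shiftRight]
  cases hx : x.testBit i <;> cases hy : y.testBit i <;> cases hx2 : x.testBit (k + i) <;>
    cases hy2 : y.testBit (k + i) <;> cases hm : (16777215:ℕ).testBit i <;> rfl

lemma pvStep_xor (x y : ℕ) : pvStep (x ^^^ y) = pvStep x ^^^ pvStep y := by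
  rw [pvStep_eq, pvStep_eq, pvStep_eq, blendL, blendR, blendL]

lemma pvApply_xor (cols : List ℕ) (x y : ℕ) :
    pvApply cols (x ^^^ y) = pvApply cols x ^^^ pvApply cols y := by
  induction cols generalizing x y with
  | nil => simp [pvApply]
  | cons c cs ih =>
    simp only [pvApply, Nat.shiftRight_xor_distrib, Nat.and_xor_distrib_right, ih]
    have hx1 : x &&& 1 = x % 2 := Nat.and_one_is_mod x
    have hy1 : y &&& 1 = y % 2 := Nat.and_one_is_mod y
    have hlc : ∀ a b c : ℕ, a ^^^ (b ^^^ c) = b ^^^ (a ^^^ c) := fun a b c => by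
      rw [← Nat.xor_assoc, Nat.xor_comm a b, Nat.xor_assoc]
    rcases Nat.mod_two_eq_zero_or_one x with hx | hx <;>
      rcases Nat.mod_two_eq_zero_or_one y with hy | hy <;>
      simp [hx1, hy1, hx, hy, Nat.xor_assoc, hlc] <;> ac_rfl

lemma pvApply_basis : ∀ (k : ℕ) (f : ℕ → ℕ), (∀ a b, f (a ^^^ b) = f a ^^^ f b) →
    ∀ x, x < 2 ^ k → pvApply ((List.range k).map (fun j => f (1 <<< j))) x = f x := by
  intro k
  induction k with
  | zero =>
    intro f hf x hx
    have hx0 : x = 0 := by omega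
    have hf0 : f 0 = 0 := by have := hf 0 0; simpa using this
    simp [hx0, pvApply, hf0]
  | succ k ih =>
    intro f hf x hx
    rw [List.range_succ_eq_map]
    have hmap : (List.map Nat.succ (List.range k)).map (fun j => f (1 <<< j)) =
        (List.range k).map (fun j => (fun y => f (2 * y)) (1 <<< j)) := by
      rw [List.map_map]
      apply List.map_congr_left
      intro j _
      show f (1 <<< (j + 1)) = f (2 * (1 <<< j))
      congr 1
      rw [Nat.shiftLeft_eq, Nat.shiftLeft_eq, Nat.pow_succ]
      ring
    have hf' : ∀ a b, (fun y => f (2 * y)) (a ^^^ b) = (fun y => f (2 * y)) a ^^^ (fun y => f (2 * y)) b := by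
      intro a b
      show f (2 * (a ^^^ b)) = f (2 * a) ^^^ f (2 * b)
      have h2 : 2 * (a ^^^ b) = 2 * a ^^^ 2 * b := by
        have := Nat.shiftLeft_xor_distrib (a := a) (b := b) (i := 1)
        simpa [Nat.shiftLeft_eq, Nat.mul_comm] using this
      rw [h2, hf]
    have hdiv : x >>> 1 < 2 ^ k := by
      rw [Nat.shiftRight_eq_div_pow]
      have := Nat.pow_succ 2 k
      omega
    rw [List.map_cons, hmap]
    simp only [pvApply]
    rw [ih (fun y => f (2 * y)) hf' (x >>> 1) hdiv]
    have hsplit : 2 * (x >>> 1) ^^^ x % 2 = x := by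
      apply Nat.eq_of_testBit_eq
      intro i
      cases i with
      | zero =>
        simp [Nat.testBit_xor, Nat.testBit_zero, Nat.mul_mod_right, Nat.mod_mod_of_dvd]
      | succ i =>
        rw [Nat.testBit_add_one, Nat.testBit_add_one, Nat.xor_div_two]
        rw [show 2 * (x >>> 1) / 2 = x >>> 1 from by omega,
          show x % 2 / 2 = 0 from by omega, Nat.xor_zero, Nat.shiftRight_one]
    have hfx : f x = f (2 * (x >>> 1)) ^^^ f (x % 2) := by rw [← hf, hsplit]
    have hx1 : x &&& 1 = x % 2 := Nat.and_one_is_mod x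
    have hf0 : f 0 = 0 := by have := hf 0 0; simpa using this
    rcases Nat.mod_two_eq_zero_or_one x with hp | hp <;>
      simp [hx1, hp, hfx, hf0]

lemma pvApply_mul (m1 m2 : List ℕ) (x : ℕ) :
    pvApply (pvMul m1 m2) x = pvApply m1 (pvApply m2 x) := by
  induction m2 generalizing x with
  | nil => simp [pvMul, pvApply, pvApply_zero]
  | cons c cs ih =>
    have hmm : pvMul m1 (c :: cs) = pvApply m1 c :: pvMul m1 cs := rfl
    rw [hmm]
    simp only [pvApply, ih]
    by_cases h : x % 2 = 1 <;> simp [h, pvApply_xor, Nat.and_one_is_mod]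

lemma pvMatpow_apply (n x : ℕ) (hx : x < 16777216) :
    pvApply (pvMatpow ((List.range 24).map (fun j => pvStep (1 <<< j))) n) x = pvStep^[n] x := by
  induction n using Nat.strong_induction_on generalizing x with
  | _ n ih =>
    rw [pvMatpow]
    by_cases h : n = 0
    · subst h
      simp only [dif_pos]
      have hid := pvApply_basis 24 id (fun a b => rfl) x (by norm_num at hx ⊢; exact hx)
      simpa using hid
    · rw [dif_neg h]
      have hhalf : n / 2 < n := Nat.div_lt_self (Nat.pos_of_ne_zero h) (by omega)
      have happ : ∀ y, y < 16777216 →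
          pvApply (pvMul (pvMatpow ((List.range 24).map (fun j => pvStep (1 <<< j))) (n / 2))
            (pvMatpow ((List.range 24).map (fun j => pvStep (1 <<< j))) (n / 2))) y
          = pvStep^[n / 2 + n / 2] y := by
        intro y hy
        rw [pvApply_mul, ih _ hhalf _ hy, ih _ hhalf _ (pvStep_iter_lt _ _ hy),
          ← Function.iterate_add_apply]
      by_cases hpar : n % 2 = 1
      · rw [if_pos hpar]
        rw [pvApply_mul, happ _ hx]
        rw [pvApply_basis 24 pvStep pvStep_xor _ (by
          have := pvStep_iter_lt (n / 2 + n / 2) x hx; norm_num at this ⊢; exact this)]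
        have hn2 : n = n / 2 + n / 2 + 1 := by omega
        conv_rhs => rw [hn2, Function.iterate_succ_apply']
      · rw [if_neg hpar]
        rw [happ _ hx]
        congr 1
        omega

lemma iterate_cross (n : ℕ) (y : ℕ) (hy : y < 16777216) :
    processStep^[n] ((y : ℕ) : ℤ) = ((pvStep^[n] y : ℕ) : ℤ) := by
  induction n generalizing y with
  | zero => rfl
  | succ n ih =>
    rw [Function.iterate_succ_apply, Function.iterate_succ_apply, stepCross]
    have hband : PySem.Int.band ((y:ℕ):ℤ) 16777215 = ((y &&& 16777215 : ℕ) : ℤ) := by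
      rw [show (16777215:ℤ) = ((16777215:ℕ):ℤ) from by norm_num, PySem.Int.band_natCast]
    rw [hband, Int.toNat_natCast]
    have hyy : y &&& 16777215 = y := by
      have hmm := Nat.and_two_pow_sub_one_eq_mod y 24
      norm_num at hmm
      rw [hmm]
      omega
    rw [hyy]
    exact ih _ (pvStep_lt _)

-- ===== VERDICT (by name: the statement is the Claim_ definition above) =====
theorem process_spec : Claim_equal_process := by
  intro secret iterations _
  unfold Spec_process process_alt
  by_cases hit : iterations ≤ 0
  · rw [process_eq_iterate]
    have : iterations.toNat = 0 := by omega
    simp [this, hit]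
  · simp only [hit, if_false]
    rw [process_eq_iterate]
    obtain ⟨n, hn⟩ : ∃ n, iterations.toNat = n + 1 := ⟨iterations.toNat - 1, by omega⟩
    rw [hn, Function.iterate_succ_apply, stepCross,
      iterate_cross n _ (pvStep_lt _),
      pvMatpow_apply _ _ (band_mask_lt secret),
      Function.iterate_succ_apply]
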